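-- pv_equiv track=rewrite | github.com/doocs/leetcode | solution/3800-3899/3827.Count Monobit Integers/Solution.py | countMonobit
-- ===== SOURCE A (Python) =====
-- def countMonobit(n: int) -> int:
--     ans = x = 1
--     i = 1
--     while x <= n:
--         ans += 1
--         x += 1 << i
--         i += 1
--     return ans
-- ===== SOURCE B (Python) =====
-- def countMonobit(n: int) -> int:
--     # closed form: count of k>=0 with 2^k - 1 <= n, clamped to 1 for negative n
--     return 1 if n < 0 else (n + 1).bit_length()
-- ===== Notes on version B (the rewrite author's own statement) =====
-- stated objective: simpler
-- what changed: Replaced the doubling while-loop accumulator with a closed-form bit_length computation: the answer is (n+1).bit_length() for n >= 0, clamped to 1 for negative n.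
import Mathlib
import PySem

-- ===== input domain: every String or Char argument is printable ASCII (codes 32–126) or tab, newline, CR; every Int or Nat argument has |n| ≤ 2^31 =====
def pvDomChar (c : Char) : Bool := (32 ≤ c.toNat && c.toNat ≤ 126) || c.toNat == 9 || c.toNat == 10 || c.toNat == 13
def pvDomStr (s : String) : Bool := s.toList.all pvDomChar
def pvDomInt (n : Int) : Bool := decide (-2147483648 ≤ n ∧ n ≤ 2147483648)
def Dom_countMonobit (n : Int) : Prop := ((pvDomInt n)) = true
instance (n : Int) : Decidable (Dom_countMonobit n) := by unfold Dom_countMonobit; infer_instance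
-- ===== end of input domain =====

-- B replaces A's doubling while-loop with a closed-form bit-length computation (simpler).
-- ===== PORT A =====
-- while x <= n: ans += 1; x += 1 << i; i += 1  — x strictly increases, so (n+1-x).toNat decreases
def countMonobitLoop (n ans x : Int) (i : Nat) : Int :=
  if h : x ≤ n then countMonobitLoop n (ans + 1) (x + 2 ^ i) (i + 1) else ans
termination_by (n + 1 - x).toNat
decreasing_by
  have h2 : (1:Int) ≤ 2 ^ i := one_le_pow₀ (by norm_num)
  omega

def countMonobit (n : Int) : Int := countMonobitLoop n 1 1 1

-- ===== PORT B =====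
-- (n+1).bit_length for n ≥ 0 is Nat.log2 (n+1).toNat + 1, exact since n+1 ≥ 1
def countMonobit_alt (n : Int) : Int :=
  if n < 0 then 1 else (Nat.log2 (n + 1).toNat + 1 : Nat)

-- ===== PRECONDITION & SPEC =====
def Spec_countMonobit (n : Int) (out : Int) : Prop := out = countMonobit_alt n
instance (n : Int) (out : Int) : Decidable (Spec_countMonobit n out) := by unfold Spec_countMonobit; infer_instance

-- ===== CLAIM (what is proved, stated in full; the proofs are below) =====
def Claim_equal_countMonobit : Prop := ∀ (n : Int), Dom_countMonobit n → Spec_countMonobit n (countMonobit n)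

-- ===== LEMMAS AND PROOFS =====

-- ===== VERDICT (by name: the statement is the Claim_ definition above) =====
-- invariant: entering the loop with ans = i, x = 2^i - 1 and 2^(i-1) ≤ n+1 yields log2(n+1)+1
theorem countMonobitLoop_eq (n : Int) (i : Nat) (hi : 1 ≤ i)
    (hle : (2:Int) ^ (i - 1) ≤ n + 1) :
    countMonobitLoop n i (2 ^ i - 1) i = (Nat.log2 (n + 1).toNat + 1 : Nat) := by
  have key : ∀ k i, 1 ≤ i → (2:Int) ^ (i - 1) ≤ n + 1 →
      Nat.log2 (n + 1).toNat + 1 - i ≤ k →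
      countMonobitLoop n i (2 ^ i - 1) i = (Nat.log2 (n + 1).toNat + 1 : Nat) := by
    intro k
    induction k with
    | zero =>
      intro i hi hle hk
      have hnn : (0:Int) ≤ n + 1 := le_trans (by positivity) hle
      have hiL : Nat.log2 (n + 1).toNat + 1 ≤ i := by omega
      -- since log2+1 ≤ i we have n+1 < 2^i, so the loop stops immediately
      have hlt : (n + 1).toNat < 2 ^ i := by
        calc (n + 1).toNat < 2 ^ ((n + 1).toNat.log2 + 1) := Nat.lt_log2_self
          _ ≤ 2 ^ i := Nat.pow_le_pow_right (by norm_num) hiL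
      have hstop : ¬ (2:Int) ^ i - 1 ≤ n := by
        have : (n + 1) < (2:Int) ^ i := by
          have := (Int.toNat_of_nonneg hnn)
          calc (n + 1) = ((n + 1).toNat : Int) := this.symm
            _ < ((2 ^ i : Nat) : Int) := by exact_mod_cast hlt
            _ = (2:Int) ^ i := by push_cast; ring
        omega
      rw [countMonobitLoop, dif_neg hstop]
      -- also 2^(i-1) ≤ n+1 forces log2 ≥ i-1, so log2+1 = i
      have hge : i - 1 ≤ (n + 1).toNat.log2 := by
        have hpow : 2 ^ (i - 1) ≤ (n + 1).toNat := by
          have : ((2 ^ (i-1) : Nat) : Int) ≤ ((n + 1).toNat : Int) := by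
            rw [Int.toNat_of_nonneg hnn]; exact_mod_cast hle
          exact_mod_cast this
        have hne : (n + 1).toNat ≠ 0 := by
          have : (1:Nat) ≤ 2 ^ (i-1) := Nat.one_le_two_pow
          omega
        rw [Nat.log2_eq_log_two]
        exact (Nat.le_log_iff_pow_le (by norm_num) hne).mpr hpow
      have : (n + 1).toNat.log2 + 1 = i := by omega
      rw [this]
    | succ k ih =>
      intro i hi hle hk
      by_cases hc : (2:Int) ^ i - 1 ≤ n
      · rw [countMonobitLoop, dif_pos hc]
        have hx : (2:Int) ^ i - 1 + 2 ^ i = 2 ^ (i + 1) - 1 := by ring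
        have hnn : (0:Int) ≤ n + 1 := le_trans (by positivity) hle
        -- 2^i ≤ n+1 gives i ≤ log2, so the measure decreases
        have hge : i ≤ (n + 1).toNat.log2 := by
          have hpow : 2 ^ i ≤ (n + 1).toNat := by
            have : ((2 ^ i : Nat) : Int) ≤ ((n + 1).toNat : Int) := by
              rw [Int.toNat_of_nonneg hnn]; push_cast; omega
            exact_mod_cast this
          have hne : (n + 1).toNat ≠ 0 := by
            have : (1:Nat) ≤ 2 ^ i := Nat.one_le_two_pow
            omega
          rw [Nat.log2_eq_log_two]
          exact (Nat.le_log_iff_pow_le (by norm_num) hne).mpr hpow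
        have h1 := ih (i + 1) (by omega) (by simpa using (by omega : (2:Int) ^ i ≤ n + 1)) (by omega)
        simpa [hx, Nat.cast_add, Nat.cast_one] using h1
      · rw [countMonobitLoop, dif_neg hc]
        have hnn : (0:Int) ≤ n + 1 := le_trans (by positivity) hle
        have hge : i - 1 ≤ (n + 1).toNat.log2 := by
          have hpow : 2 ^ (i - 1) ≤ (n + 1).toNat := by
            have : ((2 ^ (i-1) : Nat) : Int) ≤ ((n + 1).toNat : Int) := by
              rw [Int.toNat_of_nonneg hnn]; exact_mod_cast hle
            exact_mod_cast this
          have hne : (n + 1).toNat ≠ 0 := by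
            have : (1:Nat) ≤ 2 ^ (i-1) := Nat.one_le_two_pow
            omega
          rw [Nat.log2_eq_log_two]
          exact (Nat.le_log_iff_pow_le (by norm_num) hne).mpr hpow
        have hlt2 : (n + 1).toNat.log2 < i := by
          by_contra hcon
          have hiL : i ≤ (n + 1).toNat.log2 := by omega
          have hne2 : (n + 1).toNat ≠ 0 := by
            have : (1:Int) ≤ n + 1 := le_trans (one_le_pow₀ (by norm_num : (1:Int) ≤ 2)) hle
            omega
          have hpow : 2 ^ i ≤ (n + 1).toNat := by
            rw [Nat.log2_eq_log_two] at hiL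
            exact Nat.pow_le_of_le_log hne2 hiL
          apply hc
          have : ((2 ^ i : Nat) : Int) ≤ ((n + 1).toNat : Int) := by exact_mod_cast hpow
          rw [Int.toNat_of_nonneg hnn] at this
          push_cast at this; omega
        have : (n + 1).toNat.log2 + 1 = i := by omega
        rw [this]
  exact key (Nat.log2 (n + 1).toNat + 1 - i) i hi hle le_rfl

theorem countMonobit_spec : Claim_equal_countMonobit := by
  intro n _
  unfold Spec_countMonobit countMonobit countMonobit_alt
  by_cases hn : n < 0
  · rw [countMonobitLoop]
    simp [hn, show ¬ (1:Int) ≤ n by omega]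
  · have := countMonobitLoop_eq n 1 le_rfl (by push_cast; omega)
    simp only [show ((2:Int)^1 - 1) = 1 by norm_num, Nat.cast_one] at this
    rw [if_neg hn, this]
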